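-- pv_equiv track=rewrite | github.com/RozanskiT/vidmapy | build/lib/vidmapy/kurucz/utility_functions.py | _create_columns_from_format_string
-- ===== SOURCE A (Python) =====
-- def _create_columns_from_format_string(format_string):
--     """
--     "+++00^^++" -> ((0,3),(5,7),(7,9))
--     0 stands for column to ommit
--     """
--     columns = []
--     last_change_idx = 0
--     last_character = -1
--     for i, c in enumerate(format_string+"x"): # add 'x' to introduce change at the end
--         if last_character != c:
--             if last_change_idx != i and last_character != '0':
--                 columns.append((last_change_idx,i))
--             last_change_idx = i
--             last_character = c
--     return tuple(columns)
-- ===== SOURCE B (Python) =====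
-- def _create_columns_from_format_string(format_string):
--     """
--     "+++00^^++" -> ((0,3),(5,7),(7,9))
--     0 stands for column to ommit
--     """
--     s = format_string + "x"  # sentinel: the final run is never paired
--     # stage 1: every run-start position (index 0, or a character change)
--     starts = [i for i in range(len(s)) if i == 0 or s[i] != s[i - 1]]
--     # stage 2: consecutive starts delimit runs; keep runs not made of '0'
--     return tuple((a, b) for a, b in zip(starts, starts[1:]) if s[a] != "0")
-- ===== Notes on version B (the rewrite author's own statement) =====
-- stated objective: alternative
-- what changed: Replaced A's single-pass change-detection state machine (last_change_idx/last_character accumulator emitting on each change) by two staged comprehensions: first build the list of all run-start indices, then pair consecutive starts with zip(starts, starts[1:]) and keep the pairs whose run character is not '0'.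
import Mathlib
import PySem

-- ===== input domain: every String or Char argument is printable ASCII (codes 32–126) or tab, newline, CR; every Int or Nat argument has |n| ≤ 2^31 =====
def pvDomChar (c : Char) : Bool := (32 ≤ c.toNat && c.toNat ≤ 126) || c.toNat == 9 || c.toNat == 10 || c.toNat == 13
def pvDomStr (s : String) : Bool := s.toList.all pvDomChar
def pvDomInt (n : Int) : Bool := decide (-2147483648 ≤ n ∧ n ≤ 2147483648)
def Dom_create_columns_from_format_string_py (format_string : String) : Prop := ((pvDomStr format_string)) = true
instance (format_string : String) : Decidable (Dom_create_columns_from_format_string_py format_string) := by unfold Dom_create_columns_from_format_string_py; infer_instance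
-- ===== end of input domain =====

-- B replaces A's one-pass change-detection state machine by two staged passes:
-- collect all run-start indices, then pair consecutive starts (objective: alternative, same cost).

-- ===== PORT A =====
-- A's loop state: columns, last_change_idx, last_character (none = the initial -1), current index i.
def pvLoopA (cols : List (Int × Int)) (lci : Int) (lc : Option Char) (i : Int) : List Char → List (Int × Int)
  | [] => cols
  | c :: rest =>
    if lc ≠ some c then
      pvLoopA (if lci ≠ i ∧ lc ≠ some '0' then cols ++ [(lci, i)] else cols) i (some c) (i + 1) rest
    else
      pvLoopA cols lci lc (i + 1) rest

def create_columns_from_format_string_py (format_string : String) : List (Int × Int) :=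
  pvLoopA [] 0 none 0 (format_string ++ "x").toList

-- ===== PORT B =====
-- stage 1 of Source B: [i for i in range(len(s)) if i == 0 or s[i] != s[i-1]]
-- (for i ≥ 1 both s[i] and s[i-1] are always in range, so getD with a dummy default is exact)
def pvStarts (l : List Char) : List Nat :=
  (List.range l.length).filter (fun i => decide (i = 0 ∨ l.getD i ' ' ≠ l.getD (i - 1) ' '))

-- stage 2 of Source B: tuple((a, b) for a, b in zip(starts, starts[1:]) if s[a] != "0")
def create_columns_from_format_string_py_alt (format_string : String) : List (Int × Int) :=
  (((pvStarts (format_string ++ "x").toList).zip (pvStarts (format_string ++ "x").toList).tail).filter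
      (fun p => decide ((format_string ++ "x").toList.getD p.1 ' ' ≠ '0'))).map
    (fun p => ((p.1 : Int), (p.2 : Int)))

-- ===== PRECONDITION & SPEC =====
def Spec_create_columns_from_format_string_py (format_string : String) (out : List (Int × Int)) : Prop := out = create_columns_from_format_string_py_alt format_string
instance (format_string : String) (out : List (Int × Int)) : Decidable (Spec_create_columns_from_format_string_py format_string out) := by unfold Spec_create_columns_from_format_string_py; infer_instance

-- ===== CLAIM (what is proved, stated in full; the proofs are below) =====
def Claim_equal_create_columns_from_format_string_py : Prop := ∀ (format_string : String), Dom_create_columns_from_format_string_py format_string → Spec_create_columns_from_format_string_py format_string (create_columns_from_format_string_py format_string)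

-- ===== LEMMAS AND PROOFS =====

-- Proof-side run scanner bridging A's state machine and B's starts/zip formulation.
def pvLoopB (cols : List (Int × Int)) (i : Int) : List Char → List (Int × Int)
  | [] => cols
  | c :: t =>
    if t.dropWhile (· == c) = [] then cols
    else
      pvLoopB (if c ≠ '0' then cols ++ [(i, i + 1 + (t.takeWhile (· == c)).length)] else cols)
        (i + 1 + (t.takeWhile (· == c)).length) (t.dropWhile (· == c))
  termination_by l => l.length
  decreasing_by
    have := List.length_dropWhile_le (· == c) t
    simp only [List.length_cons]
    omega

lemma pvLoopB_cons (cols : List (Int × Int)) (i : Int) (c : Char) (t : List Char) :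
    pvLoopB cols i (c :: t) =
      if t.dropWhile (· == c) = [] then cols
      else
        pvLoopB (if c ≠ '0' then cols ++ [(i, i + 1 + (t.takeWhile (· == c)).length)] else cols)
          (i + 1 + (t.takeWhile (· == c)).length) (t.dropWhile (· == c)) := by
  rw [pvLoopB]

-- A's state machine in the middle of a run of `c` that started at index `lci` and has covered
-- `k ≥ 1` characters equals the run scanner restarted on the rest of the input.
lemma pvLoopA_run (l : List Char) : ∀ (cols : List (Int × Int)) (lci : Int) (k : Nat) (c : Char),
    1 ≤ k →
    pvLoopA cols lci (some c) (lci + (k : Int)) l =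
      if l.dropWhile (· == c) = [] then cols
      else
        pvLoopB (if c ≠ '0' then cols ++ [(lci, lci + (k : Int) + (l.takeWhile (· == c)).length)] else cols)
          (lci + (k : Int) + (l.takeWhile (· == c)).length) (l.dropWhile (· == c)) := by
  induction l with
  | nil =>
    intro cols lci k c hk
    simp [pvLoopA]
  | cons d t ih =>
    intro cols lci k c hk
    by_cases hdc : d = c
    · subst hdc
      have h1 : pvLoopA cols lci (some d) (lci + (k : Int)) (d :: t)
          = pvLoopA cols lci (some d) (lci + (k : Int) + 1) t := by
        simp [pvLoopA]
      have h2 : lci + (k : Int) + 1 = lci + ((k + 1 : Nat) : Int) := by push_cast; ring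
      rw [h1, h2, ih cols lci (k + 1) d (by omega)]
      have htw : (d :: t).takeWhile (· == d) = d :: t.takeWhile (· == d) := by simp
      have hdw : (d :: t).dropWhile (· == d) = t.dropWhile (· == d) := by simp
      rw [htw, hdw]
      have hlen : lci + ((k + 1 : Nat) : Int) + ((t.takeWhile (· == d)).length : Int)
          = lci + (k : Int) + (((d :: t.takeWhile (· == d)).length : Nat) : Int) := by
        simp only [List.length_cons]; push_cast; ring
      rw [hlen]
    · have hne : ¬ ((d == c) = true) := by simp [hdc]
      have hk' : lci ≠ lci + (k : Int) := by omega
      have hA : pvLoopA cols lci (some c) (lci + (k : Int)) (d :: t)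
          = pvLoopA (if c ≠ '0' then cols ++ [(lci, lci + (k : Int))] else cols)
              (lci + (k : Int)) (some d) (lci + (k : Int) + 1) t := by
        have hcond : (some c : Option Char) ≠ some d := by simp [Ne.symm hdc]
        simp only [pvLoopA]
        rw [if_pos hcond]
        congr 1
        by_cases h0 : c = '0' <;> simp [h0, hk']
      have h2 : lci + (k : Int) + 1 = (lci + (k : Int)) + ((1 : Nat) : Int) := by push_cast; ring
      rw [hA, h2, ih _ (lci + (k : Int)) 1 d le_rfl]
      have htw : (d :: t).takeWhile (· == c) = [] := by simp [hne]
      have hdw : (d :: t).dropWhile (· == c) = d :: t := by simp [hne]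
      rw [htw, hdw, if_neg (List.cons_ne_nil d t), pvLoopB_cons]
      simp only [List.length_nil, Nat.cast_zero, add_zero, Nat.cast_one]

-- positions i in l where l[i] differs from the preceding character ((prev::l)[i])
def pvF (prev : Char) (l : List Char) : List Nat :=
  (List.range l.length).filter (fun i => decide (l.getD i ' ' ≠ (prev :: l).getD i ' '))

lemma pvF_cons (prev c : Char) (t : List Char) :
    pvF prev (c :: t) = (if c ≠ prev then [0] else []) ++ (pvF c t).map (· + 1) := by
  unfold pvF
  rw [show (c :: t).length = t.length + 1 from rfl, List.range_succ_eq_map]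
  simp only [List.filter_cons, List.filter_map]
  have hfun : ((fun i => decide ((c :: t).getD i ' ' ≠ (prev :: c :: t).getD i ' ')) ∘ Nat.succ)
      = fun j => decide (t.getD j ' ' ≠ (c :: t).getD j ' ') := by
    funext j; simp [Function.comp]
  rw [hfun]
  by_cases h : c = prev <;> simp [h, Nat.succ_eq_add_one]

lemma pvF_run (t : List Char) : ∀ c, pvF c t = (pvF c (t.dropWhile (· == c))).map (· + (t.takeWhile (· == c)).length) := by
  induction t with
  | nil => intro c; simp [pvF]
  | cons d t' ih =>
    intro c
    by_cases hdc : d = c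
    · subst hdc
      have h1 : pvF d (d :: t') = (pvF d t').map (· + 1) := by rw [pvF_cons]; simp
      have hdd : ((d == d) = true) := beq_self_eq_true d
      rw [h1, ih d, List.takeWhile_cons, List.dropWhile_cons]
      simp only [hdd, if_true, List.map_map, List.length_cons]
      have : ((· + 1) ∘ (· + (List.takeWhile (· == d) t').length) : Nat → Nat)
          = (· + ((List.takeWhile (· == d) t').length + 1)) := by
        funext j; simp [Function.comp]; omega
      rw [this]
    · have hdcf : (d == c) = false := by simp [hdc]
      rw [List.takeWhile_cons, List.dropWhile_cons]
      simp [hdcf]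

lemma pvStarts_cons (c : Char) (t : List Char) :
    pvStarts (c :: t) = 0 :: (pvF c t).map (· + 1) := by
  unfold pvStarts pvF
  rw [show (c :: t).length = t.length + 1 from rfl, List.range_succ_eq_map]
  simp only [List.filter_cons, List.filter_map]
  have hfun : ((fun i => decide (i = 0 ∨ (c :: t).getD i ' ' ≠ (c :: t).getD (i - 1) ' ')) ∘ Nat.succ)
      = fun j => decide (t.getD j ' ' ≠ (c :: t).getD j ' ') := by
    funext j; simp [Function.comp]
  rw [hfun]
  simp [Nat.succ_eq_add_one]

-- getD after a drop
lemma getD_drop (l : List Char) (m a : Nat) (d : Char) :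
    (l.drop m).getD a d = l.getD (m + a) d := by
  simp [List.getD, List.getElem?_drop]

lemma drop_run (c : Char) (t : List Char) :
    (c :: t).drop ((t.takeWhile (· == c)).length + 1) = t.dropWhile (· == c) := by
  have h : t = t.takeWhile (· == c) ++ t.dropWhile (· == c) := (List.takeWhile_append_dropWhile).symm
  calc (c :: t).drop ((t.takeWhile (· == c)).length + 1)
      = t.drop ((t.takeWhile (· == c)).length) := by simp [List.drop_succ_cons]
    _ = t.dropWhile (· == c) := by
        have h2 : t.drop ((t.takeWhile (· == c)).length)
            = (t.takeWhile (· == c) ++ t.dropWhile (· == c)).drop ((t.takeWhile (· == c)).length) := by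
          rw [List.takeWhile_append_dropWhile]
        rw [h2]
        exact List.drop_left ..

lemma dropWhile_head_false (p : Char → Bool) (t : List Char) (d : Char) (t' : List Char)
    (h : t.dropWhile p = d :: t') : p d = false := by
  induction t with
  | nil => simp [List.dropWhile] at h
  | cons a t ih =>
    rw [List.dropWhile_cons] at h
    by_cases hp : p a = true
    · rw [if_pos hp] at h; exact ih h
    · rw [if_neg hp] at h
      have : a = d := (List.cons_eq_cons.mp h).1
      subst this
      simpa using hp

lemma pv_zip_shift (k : Nat) (a : Nat) (L : List Nat) :
    ((a + k) :: L.map (· + k)).zip (L.map (· + k))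
      = ((a :: L).zip L).map (fun p : Nat × Nat => (p.1 + k, p.2 + k)) := by
  induction L generalizing a with
  | nil => simp
  | cons b L ih => simp [List.zip_cons_cons, ih b]

-- The run scanner equals B's starts/zip formulation, with an Int offset i.
lemma pvLoopB_eq (n : Nat) : ∀ (t : List Char), t.length ≤ n → ∀ (c : Char) (i : Int) (cols : List (Int × Int)),
    pvLoopB cols i (c :: t) = cols ++
      ((((pvStarts (c :: t)).zip (pvStarts (c :: t)).tail).filter
          (fun p => decide ((c :: t).getD p.1 ' ' ≠ '0'))).map
        (fun p => (i + (p.1 : Int), i + (p.2 : Int)))) := by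
  induction n with
  | zero =>
    intro t ht c i cols
    have : t = [] := List.eq_nil_of_length_eq_zero (Nat.le_zero.mp ht)
    subst this
    rw [pvLoopB_cons]
    simp [pvStarts_cons, pvF]
  | succ n ih =>
    intro t ht c i cols
    rcases hdw : t.dropWhile (· == c) with _ | ⟨d, t'⟩
    · rw [pvLoopB_cons, hdw, if_pos rfl]
      have hF : pvF c t = [] := by rw [pvF_run, hdw]; simp [pvF]
      simp [pvStarts_cons, hF]
    · set k := (t.takeWhile (· == c)).length with hk
      have hlen' : t'.length ≤ n := by
        have h1 : (t.dropWhile (· == c)).length ≤ t.length := List.length_dropWhile_le _ _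
        rw [hdw] at h1; simp at h1; omega
      have hdcf : (d == c) = false := dropWhile_head_false _ t d t' hdw
      -- F is the tail of the starts of (d :: t')
      set F : List Nat := (pvF d t').map (· + 1) with hF
      have hFd : pvF c (d :: t') = 0 :: F := by
        rw [pvF_cons]
        simp [show d ≠ c from fun h => by simp [h] at hdcf, hF]
      have hst' : pvStarts (d :: t') = 0 :: F := by rw [pvStarts_cons, ← hF]
      have h1 : pvF c t = (0 :: F).map (· + k) := by
        rw [pvF_run t c, hdw, ← hk, hFd]
      have hstc : pvStarts (c :: t) = 0 :: (0 + (k + 1)) :: F.map (· + (k + 1)) := by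
        rw [pvStarts_cons, h1]
        simp only [List.map_cons, List.map_map]
        have e1 : (0 : Nat) + k + 1 = 0 + (k + 1) := by omega
        have e2 : ((· + 1) ∘ (· + k) : Nat → Nat) = (· + (k + 1)) := by
          funext j; simp [Function.comp]; omega
        rw [e1, e2]
      -- getD beyond the first run reads from (d :: t')
      have hget : ∀ a : Nat, (c :: t).getD (a + (k + 1)) ' ' = (d :: t').getD a ' ' := by
        intro a
        rw [Nat.add_comm a (k + 1), ← getD_drop (c :: t) (k + 1) a ' ']
        rw [show (c :: t).drop (k + 1) = d :: t' from by rw [hk, drop_run, hdw]]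
      rw [pvLoopB_cons, hdw, if_neg (List.cons_ne_nil d t'), ← hk,
        ih t' hlen' d (i + 1 + (k : Int)) _, hst', hstc]
      simp only [List.tail_cons]
      rw [List.zip_cons_cons, pv_zip_shift (k + 1) 0 F, List.filter_cons]
      have hpred : ((fun p => decide ((c :: t).getD p.1 ' ' ≠ '0')) ∘
          (fun p : Nat × Nat => (p.1 + (k + 1), p.2 + (k + 1))))
          = fun p : Nat × Nat => decide ((d :: t').getD p.1 ' ' ≠ '0') := by
        funext p; simp only [Function.comp]; rw [hget]
      have hmapfun : ((fun p : Nat × Nat => (i + (p.1 : Int), i + (p.2 : Int))) ∘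
          (fun p : Nat × Nat => (p.1 + (k + 1), p.2 + (k + 1))))
          = fun p : Nat × Nat => (i + 1 + (k : Int) + (p.1 : Int), i + 1 + (k : Int) + (p.2 : Int)) := by
        funext p; simp only [Function.comp, Prod.mk.injEq]
        constructor <;> (push_cast; ring)
      by_cases hc : c = '0'
      · rw [if_neg (by simp [hc]), if_neg (by simp [hc]),
          List.filter_map, hpred, List.map_map, hmapfun]
      · rw [if_pos hc, if_pos (by simp [hc]),
          List.filter_map, hpred, List.map_cons, List.map_map, hmapfun,
          List.append_assoc, List.singleton_append]
        congr 2
        simp only [Prod.mk.injEq]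
        constructor <;> (push_cast; ring)

-- ===== VERDICT (by name: the statement is the Claim_ definition above) =====
theorem create_columns_from_format_string_py_spec : Claim_equal_create_columns_from_format_string_py := by
  intro s _
  unfold Spec_create_columns_from_format_string_py
  unfold create_columns_from_format_string_py create_columns_from_format_string_py_alt
  have hL : (s ++ "x").toList = s.toList ++ ['x'] := by simp
  rw [hL]
  rcases h : s.toList ++ ['x'] with _ | ⟨c, t⟩
  · simp at h
  · have hAB : pvLoopA [] 0 none 0 (c :: t) = pvLoopB [] 0 (c :: t) := by
      have h1 : pvLoopA [] 0 none 0 (c :: t) = pvLoopA [] 0 (some c) 1 t := by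
        simp [pvLoopA]
      have h2 : (1 : Int) = 0 + ((1 : Nat) : Int) := by norm_num
      rw [h1, h2, pvLoopA_run t [] 0 1 c le_rfl, pvLoopB_cons]
      simp only [Nat.cast_one]
    rw [hAB, pvLoopB_eq t.length t le_rfl c 0 []]
    simp only [List.nil_append, zero_add]
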